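-- pv_equiv track=rewrite | github.com/utiasASRL/hero_radar_odometry | utils/utils.py | get_indices
-- ===== SOURCE A (Python) =====
-- def get_indices(batch_size, window_size):
--     """Retrieves batch indices for for source and target frames.
--        This is intended to be used with the UnderTheRadar model.
--     """
--     src_ids = []
--     tgt_ids = []
--     for i in range(batch_size):
--         for j in range(window_size - 1):
--             idx = i * window_size + j
--             src_ids.append(idx)
--             tgt_ids.append(idx + 1)
--     return src_ids, tgt_ids
-- ===== SOURCE B (Python) =====
-- def get_indices(batch_size, window_size):
--     """Retrieves batch indices for for source and target frames.
--        This is intended to be used with the UnderTheRadar model.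
--     """
--     if window_size <= 1:
--         return [], []
--     src_ids = [idx for idx in range(batch_size * window_size)
--                if idx % window_size != window_size - 1]
--     tgt_ids = [idx + 1 for idx in src_ids]
--     return src_ids, tgt_ids
-- ===== Notes on version B (the rewrite author's own statement) =====
-- stated objective: alternative
-- what changed: Replaces the nested (i,j) loops that append to both lists in lockstep with two staged passes: a single flat filter over range(batch_size*window_size) keeping every idx that is not the last frame of its window, then a map that shifts the kept sources by one to form the targets.
import Mathlib
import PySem

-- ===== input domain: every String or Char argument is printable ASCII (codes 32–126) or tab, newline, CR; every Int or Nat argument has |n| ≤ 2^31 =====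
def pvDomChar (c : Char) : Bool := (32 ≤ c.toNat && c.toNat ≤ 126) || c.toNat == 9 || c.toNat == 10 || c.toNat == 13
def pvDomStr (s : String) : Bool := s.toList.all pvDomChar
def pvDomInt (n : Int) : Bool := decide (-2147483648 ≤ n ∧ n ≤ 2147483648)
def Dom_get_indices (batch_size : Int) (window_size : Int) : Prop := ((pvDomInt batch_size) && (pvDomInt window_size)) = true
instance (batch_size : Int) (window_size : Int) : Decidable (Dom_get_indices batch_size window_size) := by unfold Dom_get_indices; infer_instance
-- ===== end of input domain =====

-- B replaces A's nested loops (appending to both lists in lockstep) with two staged passes: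
-- one flat filter over range(batch_size*window_size), then a map shifting the kept indices by one.

-- ===== PORT A =====
def get_indices (batch_size : Int) (window_size : Int) : List Int × List Int :=
  (PySem.List.pyRange 0 batch_size 1).foldl
    (fun st i =>
      (PySem.List.pyRange 0 (window_size - 1) 1).foldl
        (fun st j =>
          let idx := i * window_size + j
          (st.1 ++ [idx], st.2 ++ [idx + 1]))
        st)
    ([], [])

-- ===== PORT B =====
def get_indices_alt (batch_size : Int) (window_size : Int) : List Int × List Int :=
  if window_size ≤ 1 then ([], [])
  else
    let src_ids := (PySem.List.pyRange 0 (batch_size * window_size) 1).filter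
      (fun idx => decide (PySem.Int.mod idx window_size ≠ window_size - 1))
    let tgt_ids := src_ids.map (fun idx => idx + 1)
    (src_ids, tgt_ids)

-- ===== PRECONDITION & SPEC =====
def Spec_get_indices (batch_size : Int) (window_size : Int) (out : List Int × List Int) : Prop := out = get_indices_alt batch_size window_size
instance (batch_size : Int) (window_size : Int) (out : List Int × List Int) : Decidable (Spec_get_indices batch_size window_size out) := by unfold Spec_get_indices; infer_instance

-- ===== CLAIM (what is proved, stated in full; the proofs are below) =====
def Claim_equal_get_indices : Prop := ∀ (batch_size : Int) (window_size : Int), Dom_get_indices batch_size window_size → Spec_get_indices batch_size window_size (get_indices batch_size window_size)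

-- ===== LEMMAS AND PROOFS =====

-- A's loop body as data: the source index block of window i
def pvBlk (w i : Int) : List Int := (PySem.List.pyRange 0 (w - 1) 1).map (fun j => i * w + j)

-- A's pair-fold computes the concatenation of the blocks
theorem pvA_char (b w : Int) :
    get_indices b w =
      ((PySem.List.pyRange 0 b 1).flatMap (pvBlk w),
       ((PySem.List.pyRange 0 b 1).flatMap (pvBlk w)).map (fun x => x + 1)) := by
  unfold get_indices
  have inner : ∀ (i : Int) (acc : List Int × List Int),
      (PySem.List.pyRange 0 (w - 1) 1).foldl
        (fun st j =>
          let idx := i * w + j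
          (st.1 ++ [idx], st.2 ++ [idx + 1])) acc
      = (acc.1 ++ pvBlk w i, acc.2 ++ (pvBlk w i).map (fun x => x + 1)) := by
    intro i acc
    obtain ⟨a1, a2⟩ := acc
    rw [PySem.List.foldl_prod_mk (f := fun s j => s ++ [i * w + j])
        (g := fun s j => s ++ [i * w + j + 1])]
    rw [PySem.List.foldl_append_singleton_eq_map, PySem.List.foldl_append_singleton_eq_map]
    simp [pvBlk, List.map_map, Function.comp]
  calc (PySem.List.pyRange 0 b 1).foldl
        (fun st i =>
          (PySem.List.pyRange 0 (w - 1) 1).foldl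
            (fun st j =>
              let idx := i * w + j
              (st.1 ++ [idx], st.2 ++ [idx + 1])) st) ([], [])
      = (PySem.List.pyRange 0 b 1).foldl
          (fun st i => (st.1 ++ pvBlk w i, st.2 ++ (pvBlk w i).map (fun x => x + 1)))
          ([], []) := by
        apply PySem.List.foldl_congr_mem
        intro acc i _
        exact inner i acc
    _ = _ := by
        rw [PySem.List.foldl_prod_mk (f := fun s i => s ++ pvBlk w i)
            (g := fun s i => s ++ (pvBlk w i).map (fun x => x + 1))]
        rw [PySem.List.foldl_append_eq_flatMap, PySem.List.foldl_append_eq_flatMap]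
        simp [List.map_flatMap]

-- Python % with a positive divisor, on a window offset
theorem pvMod_block (i k w : Int) (hw : 1 < w) (h0 : 0 ≤ k) (hk : k < w) :
    PySem.Int.mod (i * w + k) w = k := by
  simp [PySem.Int.mod]
  rw [Int.fmod_eq_emod_of_nonneg _ (by omega), Int.emod_eq_of_lt h0 hk]

-- one window of the flat filtered range is exactly A's block
theorem pvBlock_filter (i w : Int) (hw : 1 < w) :
    (PySem.List.pyRange (i * w) (i * w + w) 1).filter
      (fun idx => decide (PySem.Int.mod idx w ≠ w - 1)) = pvBlk w i := by
  rw [PySem.List.pyRange_one]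
  simp only [add_sub_cancel_left, List.filter_map]
  have hcongr : ∀ k ∈ List.range w.toNat,
      ((fun idx => decide (PySem.Int.mod idx w ≠ w - 1)) ∘ (fun k : Nat => i * w + (k : Int))) k
        = decide (k ≠ (w - 1).toNat) := by
    intro k hk
    have hk' : (k : Int) < w := by
      have := List.mem_range.mp hk; omega
    simp only [Function.comp]
    rw [pvMod_block i k w hw (by positivity) hk']
    simp only [decide_eq_decide]
    omega
  rw [List.filter_congr hcongr]
  have hw' : w.toNat = (w - 1).toNat + 1 := by omega
  rw [hw', List.range_succ, List.filter_append]
  have h1 : (List.range ((w - 1).toNat)).filter (fun k => decide (k ≠ (w - 1).toNat))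
      = List.range ((w - 1).toNat) := by
    apply List.filter_eq_self.mpr
    intro k hk
    have := List.mem_range.mp hk
    simp; omega
  rw [h1]
  simp [pvBlk, PySem.List.pyRange_one]

-- the flat filtered range over n windows is the concatenation of A's blocks
theorem pvKey (w : Int) (hw : 1 < w) : ∀ (n : Nat),
    (PySem.List.pyRange 0 ((n : Int) * w) 1).filter
      (fun idx => decide (PySem.Int.mod idx w ≠ w - 1))
    = (PySem.List.pyRange 0 (n : Int) 1).flatMap (pvBlk w) := by
  intro n
  induction n with
  | zero => simp [PySem.List.pyRange_one_eq_nil]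
  | succ m ih =>
    have h1 : ((m + 1 : Nat) : Int) * w = (m : Int) * w + w := by push_cast; ring
    have h2 : ((m + 1 : Nat) : Int) = (m : Int) + 1 := by push_cast; ring
    rw [h1, h2]
    rw [PySem.List.pyRange_one_append 0 ((m : Int) * w) ((m : Int) * w + w)
        (by positivity) (by omega)]
    rw [PySem.List.pyRange_one_succ_right (by positivity)]
    rw [List.filter_append, List.flatMap_append, ih]
    rw [pvBlock_filter m w hw]
    simp

-- ===== VERDICT (by name: the statement is the Claim_ definition above) =====
theorem get_indices_spec : Claim_equal_get_indices := by
  intro b w _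
  unfold Spec_get_indices
  by_cases hw : w ≤ 1
  · -- window_size ≤ 1: A's inner range is empty, B returns ([], []) directly
    rw [pvA_char]
    unfold get_indices_alt
    rw [if_pos hw]
    have h1 : PySem.List.pyRange 0 (w - 1) 1 = [] := PySem.List.pyRange_one_eq_nil (by omega)
    simp [pvBlk, h1]
  · have hw' : 1 < w := by omega
    rw [pvA_char]
    unfold get_indices_alt
    rw [if_neg hw]
    simp only []
    by_cases hb : 0 < b
    · have hbn : b = ((b.toNat : Nat) : Int) := by omega
      rw [hbn, pvKey w hw' b.toNat]
    · have h1 : PySem.List.pyRange 0 b 1 = [] := PySem.List.pyRange_one_eq_nil (by omega)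
      have h2 : PySem.List.pyRange 0 (b * w) 1 = [] := by
        apply PySem.List.pyRange_one_eq_nil
        nlinarith
      rw [h1, h2]; simp
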